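-- pv_equiv track=rewrite | github.com/mavinomichael/AgentGym-RL | AgentGym-RL/verl/multi_agent/envs/prompt_policy.py | _action_targets_with_preferences
-- ===== SOURCE A (Python) =====
-- from typing import List, Optional, Tuple
--
-- def _action_targets_with_preferences(available_actions: List[str]) -> List[Tuple[str, str]]:
--     targets: List[Tuple[str, str]] = []
--     prefixes = (
--         "go to ",
--         "pickup ",
--         "toggle and go through ",
--         "go through ",
--     )
--     for prefix in prefixes:
--         for action in available_actions:
--             if action.startswith(prefix):
--                 targets.append((action[len(prefix):].strip(), action))
--     return targets
-- ===== SOURCE B (Python) =====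
-- from typing import List, Tuple
--
-- def _action_targets_with_preferences(available_actions: List[str]) -> List[Tuple[str, str]]:
--     # Single pass with four buckets (the prefixes are mutually exclusive),
--     # concatenated in prefix order at the end.
--     go_to: List[Tuple[str, str]] = []
--     pickup: List[Tuple[str, str]] = []
--     toggle_go: List[Tuple[str, str]] = []
--     go_through: List[Tuple[str, str]] = []
--     for action in available_actions:
--         if action.startswith("go to "):
--             go_to.append((action[6:].strip(), action))
--         elif action.startswith("pickup "):
--             pickup.append((action[7:].strip(), action))
--         elif action.startswith("toggle and go through "):
--             toggle_go.append((action[22:].strip(), action))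
--         elif action.startswith("go through "):
--             go_through.append((action[11:].strip(), action))
--     return go_to + pickup + toggle_go + go_through
-- ===== Notes on version B (the rewrite author's own statement) =====
-- stated objective: alternative
-- what changed: Replaces four full scans of the input (one per prefix) with a single pass that dispatches each action into one of four buckets via an if/elif chain (valid because the prefixes are mutually exclusive), concatenating the buckets in prefix order at the end.
import Mathlib
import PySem

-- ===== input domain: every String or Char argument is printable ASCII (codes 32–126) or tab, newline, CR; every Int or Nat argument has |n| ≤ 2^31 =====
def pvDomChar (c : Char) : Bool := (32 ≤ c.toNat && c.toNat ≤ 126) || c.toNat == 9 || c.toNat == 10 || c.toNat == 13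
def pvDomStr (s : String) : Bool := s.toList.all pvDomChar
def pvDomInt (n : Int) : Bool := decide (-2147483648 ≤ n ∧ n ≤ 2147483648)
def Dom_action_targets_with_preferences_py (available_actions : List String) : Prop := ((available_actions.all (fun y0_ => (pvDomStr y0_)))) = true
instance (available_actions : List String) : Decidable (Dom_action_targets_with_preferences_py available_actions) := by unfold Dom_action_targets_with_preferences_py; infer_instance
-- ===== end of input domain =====

-- B replaces A's four full scans (one per prefix) with a single pass dispatching each
-- action into one of four buckets (the prefixes are mutually exclusive), concatenated
-- in prefix order; objective: alternative decomposition (same cost, not measured faster).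


-- ===== PORT A =====
-- the tuple `prefixes` of A
def pvPrefixes : List String := ["go to ", "pickup ", "toggle and go through ", "go through "]

def action_targets_with_preferences_py (available_actions : List String) : List (String × String) :=
  pvPrefixes.foldl
    (fun targets pre =>
      available_actions.foldl
        (fun ts action =>
          if PySem.Str.startswith action pre then
            ts ++ [(PySem.Str.strip (PySem.Str.slice action (some (PySem.Str.len pre)) none), action)]
          else ts)
        targets)
    []

-- ===== PORT B =====
-- B's loop body: dispatch one action into one of the four buckets (if/elif chain)
def pvStep (s : List (String × String) × List (String × String) × List (String × String) × List (String × String))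
    (action : String) :
    List (String × String) × List (String × String) × List (String × String) × List (String × String) :=
  if PySem.Str.startswith action "go to " then
    (s.1 ++ [(PySem.Str.strip (PySem.Str.slice action (some 6) none), action)], s.2.1, s.2.2.1, s.2.2.2)
  else if PySem.Str.startswith action "pickup " then
    (s.1, s.2.1 ++ [(PySem.Str.strip (PySem.Str.slice action (some 7) none), action)], s.2.2.1, s.2.2.2)
  else if PySem.Str.startswith action "toggle and go through " then
    (s.1, s.2.1, s.2.2.1 ++ [(PySem.Str.strip (PySem.Str.slice action (some 22) none), action)], s.2.2.2)
  else if PySem.Str.startswith action "go through " then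
    (s.1, s.2.1, s.2.2.1, s.2.2.2 ++ [(PySem.Str.strip (PySem.Str.slice action (some 11) none), action)])
  else s

def action_targets_with_preferences_py_alt (available_actions : List String) : List (String × String) :=
  let st := available_actions.foldl pvStep ([], [], [], [])
  st.1 ++ st.2.1 ++ st.2.2.1 ++ st.2.2.2

-- ===== PRECONDITION & SPEC =====
def Spec_action_targets_with_preferences_py (available_actions : List String) (out : List (String × String)) : Prop := out = action_targets_with_preferences_py_alt available_actions
instance (available_actions : List String) (out : List (String × String)) : Decidable (Spec_action_targets_with_preferences_py available_actions out) := by unfold Spec_action_targets_with_preferences_py; infer_instance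

-- ===== CLAIM (what is proved, stated in full; the proofs are below) =====
def Claim_equal_action_targets_with_preferences_py : Prop := ∀ (available_actions : List String), Dom_action_targets_with_preferences_py available_actions → Spec_action_targets_with_preferences_py available_actions (action_targets_with_preferences_py available_actions)

-- ===== LEMMAS AND PROOFS =====

-- no two of the four prefixes are comparable, so startswith one excludes the others
theorem pv_excl {p q : String} (hpq : ¬ p.toList <+: q.toList) (hqp : ¬ q.toList <+: p.toList)
    {a : String} (h : PySem.Str.startswith a p = true) : PySem.Str.startswith a q = false := by
  by_contra hq
  simp only [PySem.Str.startswith_eq, PySem.Chars.startswith_iff] at h hq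
  rw [Bool.not_eq_false, PySem.Chars.startswith_iff] at hq
  rcases List.prefix_or_prefix_of_prefix h hq with h' | h' <;> [exact hpq h'; exact hqp h']

-- one inner loop of A collects the matching actions in order
theorem pv_foldA (c : String → Bool) (k : Int) (xs : List String) (acc : List (String × String)) :
    xs.foldl (fun ts action =>
        if c action then
          ts ++ [(PySem.Str.strip (PySem.Str.slice action (some k) none), action)]
        else ts) acc
      = acc ++ (xs.filter c).map
          (fun action => (PySem.Str.strip (PySem.Str.slice action (some k) none), action)) :=
  PySem.List.foldl_append_if c _ xs acc

-- B's single pass fills the four buckets with its (first-match) filters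
theorem pv_foldB (xs : List String) (g1 g2 g3 g4 : List (String × String)) :
    xs.foldl pvStep (g1, g2, g3, g4)
      = (g1 ++ (xs.filter (fun a => PySem.Str.startswith a "go to ")).map
            (fun a => (PySem.Str.strip (PySem.Str.slice a (some 6) none), a)),
         g2 ++ (xs.filter (fun a => !PySem.Str.startswith a "go to "
                  && PySem.Str.startswith a "pickup ")).map
            (fun a => (PySem.Str.strip (PySem.Str.slice a (some 7) none), a)),
         g3 ++ (xs.filter (fun a => !PySem.Str.startswith a "go to "
                  && !PySem.Str.startswith a "pickup "
                  && PySem.Str.startswith a "toggle and go through ")).map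
            (fun a => (PySem.Str.strip (PySem.Str.slice a (some 22) none), a)),
         g4 ++ (xs.filter (fun a => !PySem.Str.startswith a "go to "
                  && !PySem.Str.startswith a "pickup "
                  && !PySem.Str.startswith a "toggle and go through "
                  && PySem.Str.startswith a "go through ")).map
            (fun a => (PySem.Str.strip (PySem.Str.slice a (some 11) none), a))) := by
  induction xs generalizing g1 g2 g3 g4 with
  | nil => simp
  | cons x xs ih =>
    simp only [List.foldl_cons, List.filter_cons, pvStep]
    by_cases h1 : PySem.Str.startswith x "go to " <;>
      by_cases h2 : PySem.Str.startswith x "pickup " <;>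
        by_cases h3 : PySem.Str.startswith x "toggle and go through " <;>
          by_cases h4 : PySem.Str.startswith x "go through " <;>
            (try simp at h1 h2 h3 h4) <;>
              simp [h1, h2, h3, h4, ih]

-- startswith a later prefix excludes the earlier ones (the four prefixes are incomparable)
theorem pv_x21 (a : String) (h : PySem.Str.startswith a "pickup " = true) :
    PySem.Str.startswith a "go to " = false := pv_excl (by decide) (by decide) h
theorem pv_x31 (a : String) (h : PySem.Str.startswith a "toggle and go through " = true) :
    PySem.Str.startswith a "go to " = false := pv_excl (by decide) (by decide) h
theorem pv_x32 (a : String) (h : PySem.Str.startswith a "toggle and go through " = true) :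
    PySem.Str.startswith a "pickup " = false := pv_excl (by decide) (by decide) h
theorem pv_x41 (a : String) (h : PySem.Str.startswith a "go through " = true) :
    PySem.Str.startswith a "go to " = false := pv_excl (by decide) (by decide) h
theorem pv_x42 (a : String) (h : PySem.Str.startswith a "go through " = true) :
    PySem.Str.startswith a "pickup " = false := pv_excl (by decide) (by decide) h
theorem pv_x43 (a : String) (h : PySem.Str.startswith a "go through " = true) :
    PySem.Str.startswith a "toggle and go through " = false := pv_excl (by decide) (by decide) h

-- ===== VERDICT (by name: the statement is the Claim_ definition above) =====
theorem action_targets_with_preferences_py_spec : Claim_equal_action_targets_with_preferences_py := by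
  intro xs _
  show _ = _
  have e2 : ∀ a ∈ xs, (PySem.Str.startswith a "pickup ")
      = (!PySem.Str.startswith a "go to " && PySem.Str.startswith a "pickup ") := by
    intro a _
    by_cases h : PySem.Str.startswith a "pickup "
    · simp only [h, pv_x21 a h]; decide
    · simp only [Bool.not_eq_true] at h; simp only [h, Bool.and_false]
  have e3 : ∀ a ∈ xs, (PySem.Str.startswith a "toggle and go through ")
      = (!PySem.Str.startswith a "go to " && !PySem.Str.startswith a "pickup "
          && PySem.Str.startswith a "toggle and go through ") := by
    intro a _
    by_cases h : PySem.Str.startswith a "toggle and go through "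
    · simp only [h, pv_x31 a h, pv_x32 a h]; decide
    · simp only [Bool.not_eq_true] at h; simp only [h, Bool.and_false]
  have e4 : ∀ a ∈ xs, (PySem.Str.startswith a "go through ")
      = (!PySem.Str.startswith a "go to " && !PySem.Str.startswith a "pickup "
          && !PySem.Str.startswith a "toggle and go through "
          && PySem.Str.startswith a "go through ") := by
    intro a _
    by_cases h : PySem.Str.startswith a "go through "
    · simp only [h, pv_x41 a h, pv_x42 a h, pv_x43 a h]; decide
    · simp only [Bool.not_eq_true] at h; simp only [h, Bool.and_false]
  unfold action_targets_with_preferences_py action_targets_with_preferences_py_alt pvPrefixes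
  simp only [List.foldl_cons, List.foldl_nil]
  rw [show PySem.Str.len "go to " = (6 : Int) by decide,
      show PySem.Str.len "pickup " = (7 : Int) by decide,
      show PySem.Str.len "toggle and go through " = (22 : Int) by decide,
      show PySem.Str.len "go through " = (11 : Int) by decide]
  rw [pv_foldA _ 6, pv_foldA _ 7, pv_foldA _ 22, pv_foldA _ 11, pv_foldB,
      List.filter_congr e2, List.filter_congr e3, List.filter_congr e4]
  simp
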